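-- pv_equiv track=rewrite | github.com/ashwinn-si/Skillrack-DC-DT | DT-DC-OLD/2025/05-25/03-05-DC-Matrix Boundary Prev and Next.py | layer_traversal
-- ===== SOURCE A (Python) =====
-- def layer_traversal(K_i , K_j , R , C , matrix):
--
--     border_elements_coordinates_list = []
--
--     layer = min(K_i , (R - K_i - 1) , K_j , (C - K_j - 1))
--
--     starting_i = layer
--
--     ending_i = (R - layer - 1)
--
--     starting_j = layer
--
--     ending_j = (C - layer - 1)
--
--     [border_elements_coordinates_list.append((starting_i , current_j)) for current_j in range(starting_j , (ending_j + 1))]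
--
--     [border_elements_coordinates_list.append((current_i , ending_j)) for current_i in range((starting_i + 1) , (ending_i + 1))]
--
--     [border_elements_coordinates_list.append((ending_i , current_j)) for current_j in range((ending_j - 1) , (starting_j - 1) , -1)]
--
--     [border_elements_coordinates_list.append((current_i , starting_j)) for current_i in range((ending_i - 1) , starting_i , -1)]
--
--     index = border_elements_coordinates_list.index((K_i , K_j))
--
--     clockwise_path_list = (border_elements_coordinates_list[index : ] + border_elements_coordinates_list[ : index])
--
--     anti_clockwise_path_list = (border_elements_coordinates_list[(index + 1) : ] + border_elements_coordinates_list[ : (index + 1)])[::-1]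
--
--     return (clockwise_path_list , anti_clockwise_path_list)
-- ===== SOURCE B (Python) =====
-- def layer_traversal(K_i, K_j, R, C, matrix):
--     layer = min(K_i, R - K_i - 1, K_j, C - K_j - 1)
--     si = layer
--     ei = R - layer - 1
--     sj = layer
--     ej = C - layer - 1
--     h = ei - si
--     w = ej - sj
--     # ring length: top edge (w+1) + right (h) + bottom (w) + left (h-1 if any)
--     L = (w + 1) + h + w + (h - 1 if h > 0 else 0)
--
--     def cell(t):
--         if t <= w:
--             return (si, sj + t)
--         if t <= w + h:
--             return (si + (t - w), ej)
--         if t <= 2 * w + h: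
--             return (ei, ej - (t - w - h))
--         return (ei - (t - 2 * w - h), sj)
--
--     # closed-form position of (K_i, K_j) on the ring (first occurrence)
--     if K_i == si:
--         t0 = K_j - sj
--     elif K_j == ej:
--         t0 = w + (K_i - si)
--     elif K_i == ei:
--         t0 = w + h + (ej - K_j)
--     else:
--         t0 = 2 * w + h + (ei - K_i)
--
--     clockwise_path_list = [cell((t0 + t) % L) for t in range(L)]
--     anti_clockwise_path_list = [cell((t0 + 1 + t) % L) for t in range(L)][::-1]
--     return (clockwise_path_list, anti_clockwise_path_list)
-- ===== Notes on version B (the rewrite author's own statement) =====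
-- stated objective: alternative
-- what changed: B never materialises the canonical border ring nor calls .index/rotate/slice: it computes the ring length L and the cell's ring position t0 in closed form and emits both paths directly as cell((t0+t) mod L) for t in range(L), where cell() maps a ring index to its coordinate.
import Mathlib
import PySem

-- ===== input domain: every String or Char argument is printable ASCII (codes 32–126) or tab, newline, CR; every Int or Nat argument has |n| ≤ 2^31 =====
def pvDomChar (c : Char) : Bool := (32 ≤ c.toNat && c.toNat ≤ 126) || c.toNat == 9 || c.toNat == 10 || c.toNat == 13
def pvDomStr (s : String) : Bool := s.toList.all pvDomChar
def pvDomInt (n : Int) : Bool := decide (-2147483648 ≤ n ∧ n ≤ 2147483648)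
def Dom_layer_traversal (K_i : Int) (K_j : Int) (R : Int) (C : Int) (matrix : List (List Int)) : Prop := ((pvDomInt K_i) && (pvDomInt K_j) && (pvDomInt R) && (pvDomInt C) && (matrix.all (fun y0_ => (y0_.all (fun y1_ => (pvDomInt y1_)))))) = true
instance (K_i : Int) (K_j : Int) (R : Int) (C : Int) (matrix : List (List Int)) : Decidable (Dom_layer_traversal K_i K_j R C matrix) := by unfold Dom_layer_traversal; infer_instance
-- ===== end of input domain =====

-- B replaces A's build-ring + .index + rotate-by-slices with closed-form ring indexing: ring length L,
-- start position t0 and a cell-of-ring-index function, emitting both paths directly (objective: alternative).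



-- ===== PORT A =====
def layer_traversal (K_i : Int) (K_j : Int) (R : Int) (C : Int) (matrix : List (List Int)) : (List (Int × Int)) × (List (Int × Int)) :=
  let layer := min (min (min K_i (R - K_i - 1)) K_j) (C - K_j - 1)
  let starting_i := layer
  let ending_i := R - layer - 1
  let starting_j := layer
  let ending_j := C - layer - 1
  let b : List (Int × Int) :=
    ((PySem.List.pyRange starting_j (ending_j + 1) 1).map (fun current_j => (starting_i, current_j)))
    ++ ((PySem.List.pyRange (starting_i + 1) (ending_i + 1) 1).map (fun current_i => (current_i, ending_j)))
    ++ ((PySem.List.pyRange (ending_j - 1) (starting_j - 1) (-1)).map (fun current_j => (ending_i, current_j)))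
    ++ ((PySem.List.pyRange (ending_i - 1) starting_i (-1)).map (fun current_i => (current_i, starting_j)))
  match PySem.List.index? b (K_i, K_j) with
  | none => ([], [])   -- Python raises ValueError here; unreachable: (K_i,K_j) always lies on its ring
  | some index =>
      (PySem.List.slice b (some (index : Int)) none ++ PySem.List.slice b none (some (index : Int)),
       -- xs[::-1] is List.reverse (PySem.List.slice?_none_none_neg_one)
       (PySem.List.slice b (some ((index : Int) + 1)) none ++ PySem.List.slice b none (some ((index : Int) + 1))).reverse)

-- ===== PORT B =====
-- B-side helper: Source B's `cell`, the closed-form map from a ring index t to its coordinate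
def pvCell (si sj ei ej w h t : Int) : Int × Int :=
  if t ≤ w then (si, sj + t)
  else if t ≤ w + h then (si + (t - w), ej)
  else if t ≤ 2 * w + h then (ei, ej - (t - w - h))
  else (ei - (t - 2 * w - h), sj)

def layer_traversal_alt (K_i : Int) (K_j : Int) (R : Int) (C : Int) (matrix : List (List Int)) : (List (Int × Int)) × (List (Int × Int)) :=
  let layer := min (min (min K_i (R - K_i - 1)) K_j) (C - K_j - 1)
  let si := layer
  let ei := R - layer - 1
  let sj := layer
  let ej := C - layer - 1
  let h := ei - si
  let w := ej - sj
  let L := (w + 1) + h + w + (if 0 < h then h - 1 else 0)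
  let t0 := if K_i = si then K_j - sj
            else if K_j = ej then w + (K_i - si)
            else if K_i = ei then w + h + (ej - K_j)
            else 2 * w + h + (ei - K_i)
  ((PySem.List.pyRange 0 L 1).map (fun t => pvCell si sj ei ej w h (PySem.Int.mod (t0 + t) L)),
   ((PySem.List.pyRange 0 L 1).map (fun t => pvCell si sj ei ej w h (PySem.Int.mod (t0 + 1 + t) L))).reverse)



-- ===== PRECONDITION & SPEC =====
-- No Pre_: A is total (the tracked cell always lies on the ring it induces, even off-grid).
def Spec_layer_traversal (K_i : Int) (K_j : Int) (R : Int) (C : Int) (matrix : List (List Int)) (out : (List (Int × Int)) × (List (Int × Int))) : Prop := out = layer_traversal_alt K_i K_j R C matrix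
instance (K_i : Int) (K_j : Int) (R : Int) (C : Int) (matrix : List (List Int)) (out : (List (Int × Int)) × (List (Int × Int))) : Decidable (Spec_layer_traversal K_i K_j R C matrix out) := by unfold Spec_layer_traversal; infer_instance

-- ===== CLAIM (what is proved, stated in full; the proofs are below) =====
def Claim_equal_layer_traversal : Prop := ∀ (K_i : Int) (K_j : Int) (R : Int) (C : Int) (matrix : List (List Int)), Dom_layer_traversal K_i K_j R C matrix → Spec_layer_traversal K_i K_j R C matrix (layer_traversal K_i K_j R C matrix)

-- ===== LEMMAS AND PROOFS =====
theorem rotate_eq (g : Nat → Int × Int) (N s : Nat) (hs : s ≤ N) :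
    (List.range N).map (fun k => g ((s + k) % N))
    = ((List.range N).map g).drop s ++ ((List.range N).map g).take s := by
  rcases Nat.eq_zero_or_pos N with h0 | hpos
  · subst h0; simp
  · have hr1 : List.range N = List.range s ++ (List.range (N - s)).map (s + ·) := by
      rw [← List.range_add]; congr 1; omega
    have hr2 : List.range N = List.range (N - s) ++ (List.range s).map ((N - s) + ·) := by
      rw [← List.range_add]; congr 1; omega
    have hdrop : (List.range N).drop s = (List.range (N - s)).map (s + ·) := by
      conv_lhs => rw [hr1]
      simp
    have htake : (List.range N).take s = List.range s := by
      rw [List.take_range]; congr 1; omega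
    rw [← List.map_drop, ← List.map_take, hdrop, htake, List.map_map]
    conv_lhs => rw [hr2]
    rw [List.map_append, List.map_map]
    congr 1
    · apply List.map_congr_left; intro k hk; simp only [List.mem_range] at hk
      simp only [Function.comp]
      rw [Nat.mod_eq_of_lt (by omega)]
    · apply List.map_congr_left; intro k hk; simp only [List.mem_range] at hk
      simp only [Function.comp]
      rw [show s + (N - s + k) = N + k by omega, Nat.add_mod_left, Nat.mod_eq_of_lt (by omega)]



theorem ring_eq (si sj ei ej w h : Int) (hw : w = ej - sj) (hh : h = ei - si)
    (hw0 : 0 ≤ w) (hh0 : 0 ≤ h) :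
    ((PySem.List.pyRange sj (ej + 1) 1).map (fun j => (si, j)))
    ++ ((PySem.List.pyRange (si + 1) (ei + 1) 1).map (fun i => (i, ej)))
    ++ ((PySem.List.pyRange (ej - 1) (sj - 1) (-1)).map (fun j => (ei, j)))
    ++ ((PySem.List.pyRange (ei - 1) si (-1)).map (fun i => (i, sj)))
    = (List.range ((w + 1) + h + w + (if 0 < h then h - 1 else 0)).toNat).map
        (fun (k : Nat) => pvCell si sj ei ej w h (k : Int)) := by
  have hL : ((w + 1) + h + w + (if 0 < h then h - 1 else 0)).toNat
      = (w.toNat + 1) + (h.toNat + (w.toNat + (h - 1).toNat)) := by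
    split_ifs <;> omega
  rw [hL, @List.range_add (w.toNat + 1) (h.toNat + (w.toNat + (h - 1).toNat)),
      @List.range_add h.toNat (w.toNat + (h - 1).toNat),
      @List.range_add w.toNat ((h - 1).toNat)]
  rw [PySem.List.pyRange_one, PySem.List.pyRange_one,
      PySem.List.pyRange_neg_one, PySem.List.pyRange_neg_one]
  rw [show (ej + 1 - sj).toNat = w.toNat + 1 by omega,
      show (ei + 1 - (si + 1)).toNat = h.toNat by omega,
      show (ej - 1 - (sj - 1)).toNat = w.toNat by omega,
      show (ei - 1 - si).toNat = (h - 1).toNat by omega]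
  simp only [List.map_append, List.map_map, List.append_assoc]
  congr 1
  · apply List.map_congr_left; intro k hk; simp only [List.mem_range] at hk
    simp only [Function.comp, pvCell]
    rw [if_pos (by omega)]
  congr 1
  · apply List.map_congr_left; intro k hk; simp only [List.mem_range] at hk
    simp only [Function.comp, pvCell]
    rw [if_neg (by omega), if_pos (by omega)]
    simp only [Prod.mk.injEq]
    constructor <;> first | trivial | omega
  congr 1
  · apply List.map_congr_left; intro k hk; simp only [List.mem_range] at hk
    simp only [Function.comp, pvCell]
    rw [if_neg (by omega), if_neg (by omega), if_pos (by omega)]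
    simp only [Prod.mk.injEq]
    constructor <;> first | trivial | omega
  · apply List.map_congr_left; intro k hk; simp only [List.mem_range] at hk
    simp only [Function.comp, pvCell]
    rw [if_neg (by omega), if_neg (by omega), if_neg (by omega)]
    simp only [Prod.mk.injEq]
    constructor <;> first | trivial | omega


theorem index_eq (K_i K_j si sj ei ej w h t0 : Int)
    (hw : w = ej - sj) (hh : h = ei - si)
    (h1 : si ≤ K_i) (h2 : K_i ≤ ei) (h3 : sj ≤ K_j) (h4 : K_j ≤ ej)
    (hedge : K_i = si ∨ K_j = ej ∨ K_i = ei ∨ K_j = sj)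
    (ht0 : t0 = if K_i = si then K_j - sj
            else if K_j = ej then w + (K_i - si)
            else if K_i = ei then w + h + (ej - K_j)
            else 2 * w + h + (ei - K_i)) :
    ∃ n : Nat, PySem.List.index?
      (((PySem.List.pyRange sj (ej + 1) 1).map (fun j => (si, j)))
       ++ ((PySem.List.pyRange (si + 1) (ei + 1) 1).map (fun i => (i, ej)))
       ++ ((PySem.List.pyRange (ej - 1) (sj - 1) (-1)).map (fun j => (ei, j)))
       ++ ((PySem.List.pyRange (ei - 1) si (-1)).map (fun i => (i, sj)))) ((K_i, K_j) : Int × Int) = some n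
      ∧ (n : Int) = t0
      ∧ (n : Int) < (w + 1) + h + w + (if 0 < h then h - 1 else 0) := by
  by_cases c1 : K_i = si
  · -- top edge
    refine ⟨(K_j - sj).toNat, ?_, by rw [ht0, if_pos c1]; omega, by split_ifs <;> omega⟩
    rw [PySem.List.index?_eq_some_iff]
    refine ⟨(PySem.List.pyRange sj K_j 1).map (fun j => (si, j)),
      ((PySem.List.pyRange (K_j + 1) (ej + 1) 1).map (fun j => (si, j)))
       ++ ((PySem.List.pyRange (si + 1) (ei + 1) 1).map (fun i => (i, ej)))
       ++ ((PySem.List.pyRange (ej - 1) (sj - 1) (-1)).map (fun j => (ei, j)))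
       ++ ((PySem.List.pyRange (ei - 1) si (-1)).map (fun i => (i, sj))), ?_, ?_, ?_⟩
    · rw [PySem.List.pyRange_one_append sj K_j (ej + 1) (by omega) (by omega),
         PySem.List.pyRange_one_cons (show K_j < ej + 1 by omega)]
      simp [c1, List.append_assoc]
    · simp [PySem.List.length_pyRange_one]
    · simp [PySem.List.mem_pyRange_one, Prod.mk.injEq]
  · by_cases c2 : K_j = ej
    · -- right edge
      refine ⟨((w + 1) + (K_i - si - 1)).toNat, ?_, by rw [ht0, if_neg c1, if_pos c2]; omega,
        by split_ifs <;> omega⟩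
      rw [PySem.List.index?_eq_some_iff]
      refine ⟨((PySem.List.pyRange sj (ej + 1) 1).map (fun j => (si, j)))
          ++ (PySem.List.pyRange (si + 1) K_i 1).map (fun i => (i, ej)),
        ((PySem.List.pyRange (K_i + 1) (ei + 1) 1).map (fun i => (i, ej)))
         ++ ((PySem.List.pyRange (ej - 1) (sj - 1) (-1)).map (fun j => (ei, j)))
         ++ ((PySem.List.pyRange (ei - 1) si (-1)).map (fun i => (i, sj))), ?_, ?_, ?_⟩
      · rw [PySem.List.pyRange_one_append (si + 1) K_i (ei + 1) (by omega) (by omega),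
           PySem.List.pyRange_one_cons (show K_i < ei + 1 by omega)]
        simp [c2, List.append_assoc]
      · simp [PySem.List.length_pyRange_one]; omega
      · simp [PySem.List.mem_pyRange_one, Prod.mk.injEq]
        try and_intros <;> intros <;> first | trivial | omega
    · by_cases c3 : K_i = ei
      · -- bottom edge
        refine ⟨((w + 1) + h + (ej - 1 - K_j)).toNat, ?_,
          by rw [ht0, if_neg c1, if_neg c2, if_pos c3]; omega,
          by split_ifs <;> omega⟩
        rw [PySem.List.index?_eq_some_iff]
        have hs3 : PySem.List.pyRange (ej - 1) (sj - 1) (-1)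
            = (PySem.List.pyRange (K_j + 1) ej 1).reverse ++ K_j :: (PySem.List.pyRange sj K_j 1).reverse := by
          rw [PySem.List.pyRange_neg_one_eq_reverse]
          rw [show sj - 1 + 1 = sj by ring, show ej - 1 + 1 = ej by ring]
          rw [PySem.List.pyRange_one_append sj K_j ej (by omega) (by omega),
             PySem.List.pyRange_one_cons (show K_j < ej by omega)]
          simp [List.reverse_append]
        refine ⟨((PySem.List.pyRange sj (ej + 1) 1).map (fun j => (si, j)))
            ++ ((PySem.List.pyRange (si + 1) (ei + 1) 1).map (fun i => (i, ej)))
            ++ ((PySem.List.pyRange (K_j + 1) ej 1).reverse.map (fun j => (ei, j))),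
          ((PySem.List.pyRange sj K_j 1).reverse.map (fun j => (ei, j)))
           ++ ((PySem.List.pyRange (ei - 1) si (-1)).map (fun i => (i, sj))), ?_, ?_, ?_⟩
        · rw [hs3]; simp [c3, List.append_assoc]
        · simp [PySem.List.length_pyRange_one]; omega
        · simp [PySem.List.mem_pyRange_one, Prod.mk.injEq]
          try and_intros <;> intros <;> first | trivial | omega
      · -- left edge
        have c4 : K_j = sj := by rcases hedge with e|e|e|e <;> first | exact absurd e c1 | exact absurd e c2 | exact absurd e c3 | exact e
        have hei : K_i < ei := by omega
        have hsi : si < K_i := by omega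
        have hwpos : sj < ej := by omega
        refine ⟨((w + 1) + h + w + (ei - 1 - K_i)).toNat, ?_,
          by rw [ht0, if_neg c1, if_neg c2, if_neg c3]; omega,
          by split_ifs <;> omega⟩
        rw [PySem.List.index?_eq_some_iff]
        have hs4 : PySem.List.pyRange (ei - 1) si (-1)
            = (PySem.List.pyRange (K_i + 1) ei 1).reverse ++ K_i :: (PySem.List.pyRange (si + 1) K_i 1).reverse := by
          rw [PySem.List.pyRange_neg_one_eq_reverse]
          rw [show ei - 1 + 1 = ei by ring]
          rw [PySem.List.pyRange_one_append (si + 1) K_i ei (by omega) (by omega),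
             PySem.List.pyRange_one_cons (show K_i < ei by omega)]
          simp [List.reverse_append]
        refine ⟨((PySem.List.pyRange sj (ej + 1) 1).map (fun j => (si, j)))
            ++ ((PySem.List.pyRange (si + 1) (ei + 1) 1).map (fun i => (i, ej)))
            ++ ((PySem.List.pyRange (ej - 1) (sj - 1) (-1)).map (fun j => (ei, j)))
            ++ ((PySem.List.pyRange (K_i + 1) ei 1).reverse.map (fun i => (i, sj))),
          ((PySem.List.pyRange (si + 1) K_i 1).reverse.map (fun i => (i, sj))), ?_, ?_, ?_⟩
        · rw [hs4]; simp [c4, List.append_assoc]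
        · simp [PySem.List.length_pyRange_one, PySem.List.length_pyRange_neg_one]; omega
        · simp [PySem.List.mem_pyRange_one, PySem.List.mem_pyRange_neg_one, Prod.mk.injEq]
          try and_intros <;> intros <;> first | trivial | omega

theorem main_eq (K_i K_j R C : Int) (matrix : List (List Int)) :
    layer_traversal K_i K_j R C matrix = layer_traversal_alt K_i K_j R C matrix := by
  unfold layer_traversal layer_traversal_alt
  dsimp only
  set L0 := min (min (min K_i (R - K_i - 1)) K_j) (C - K_j - 1) with hL0
  have hb1 : L0 ≤ K_i := by omega
  have hb2 : L0 ≤ R - K_i - 1 := by omega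
  have hb3 : L0 ≤ K_j := by omega
  have hb4 : L0 ≤ C - K_j - 1 := by omega
  have hedge : K_i = L0 ∨ K_j = C - L0 - 1 ∨ K_i = R - L0 - 1 ∨ K_j = L0 := by omega
  obtain ⟨n, hidx, hnt0, hnlt⟩ := index_eq K_i K_j L0 L0 (R - L0 - 1) (C - L0 - 1)
    (C - L0 - 1 - L0) (R - L0 - 1 - L0)
    (if K_i = L0 then K_j - L0
     else if K_j = C - L0 - 1 then (C - L0 - 1 - L0) + (K_i - L0)
     else if K_i = R - L0 - 1 then (C - L0 - 1 - L0) + (R - L0 - 1 - L0) + ((C - L0 - 1) - K_j)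
     else 2 * (C - L0 - 1 - L0) + (R - L0 - 1 - L0) + ((R - L0 - 1) - K_i))
    (by ring) (by ring) hb1 (by omega) hb3 (by omega) hedge rfl
  rw [hidx]
  dsimp only
  have hLpos : (0:Int) < (C - L0 - 1 - L0 + 1) + (R - L0 - 1 - L0) + (C - L0 - 1 - L0)
      + (if 0 < R - L0 - 1 - L0 then R - L0 - 1 - L0 - 1 else 0) := by split_ifs <;> omega
  set LI := (C - L0 - 1 - L0 + 1) + (R - L0 - 1 - L0) + (C - L0 - 1 - L0)
      + (if 0 < R - L0 - 1 - L0 then R - L0 - 1 - L0 - 1 else 0) with hLI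
  set N := LI.toNat with hN
  have hNL : (N : Int) = LI := by omega
  have hnN : n < N := by omega
  rw [ring_eq L0 L0 (R - L0 - 1) (C - L0 - 1) (C - L0 - 1 - L0) (R - L0 - 1 - L0)
       (by ring) (by ring) (by omega) (by omega)]
  rw [show ((n:Int) + 1) = ((n + 1 : Nat) : Int) by push_cast; ring]
  rw [PySem.List.slice_from_natCast, PySem.List.slice_to_natCast,
      PySem.List.slice_from_natCast, PySem.List.slice_to_natCast]
  rw [PySem.List.pyRange_one]
  rw [show ((LI : Int) - 0).toNat = N by omega]
  simp only [Prod.mk.injEq]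
  constructor
  · rw [← rotate_eq (fun (k : Nat) => pvCell L0 L0 (R - L0 - 1) (C - L0 - 1)
        (C - L0 - 1 - L0) (R - L0 - 1 - L0) (k : Int)) N n (by omega)]
    rw [List.map_map]
    apply List.map_congr_left
    intro k hk
    simp only [List.mem_range] at hk
    simp only [Function.comp]
    congr 1
    rw [PySem.Int.mod_eq_emod_of_pos hLpos, ← hnt0, ← hNL,
        show ((n:Int) + (0 + (k:Int))) = ((n + k : Nat) : Int) by push_cast; ring]
    exact Int.natCast_mod _ _
  · congr 1
    rw [← rotate_eq (fun (k : Nat) => pvCell L0 L0 (R - L0 - 1) (C - L0 - 1)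
        (C - L0 - 1 - L0) (R - L0 - 1 - L0) (k : Int)) N (n + 1) (by omega)]
    rw [List.map_map]
    apply List.map_congr_left
    intro k hk
    simp only [List.mem_range] at hk
    simp only [Function.comp]
    congr 1
    rw [PySem.Int.mod_eq_emod_of_pos hLpos, ← hnt0, ← hNL,
        show ((n:Int) + 1 + (0 + (k:Int))) = ((n + 1 + k : Nat) : Int) by push_cast; ring]
    exact Int.natCast_mod _ _

-- ===== VERDICT (by name: the statement is the Claim_ definition above) =====
theorem layer_traversal_spec : Claim_equal_layer_traversal := by
  intro K_i K_j R C matrix _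
  unfold Spec_layer_traversal
  exact main_eq K_i K_j R C matrix
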